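-- pv_equiv track=rewrite | github.com/Sanaullah-Afzal/Braille | Braille/Grouping.py | row_wise
-- ===== SOURCE A (Python) =====
-- def row_wise(arr: list[tuple[int, int]]):
--     """Grouping the Dots for Every 3 Rows (Makes a Line of Braille Code)"""
--     lines = []
--     count = 1
--     prev = arr[0][0]
--     start = 0
--     for i in range(len(arr)):
--         if arr[i][0] > prev:
--             count += 1
--             prev = arr[i][0]
--         if count > 3:
--             group = arr[start:i]
--             lines.append(group)
--             count = 1
--             start = i
--             prev = arr[i][0]
--         if i == len(arr) - 1:
--             group = arr[start:i+1]
--             lines.append(group)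
--
--     return lines
-- ===== SOURCE B (Python) =====
-- def row_wise(arr: list[tuple[int, int]]):
--     """Grouping the Dots for Every 3 Rows (Makes a Line of Braille Code)"""
--     # Pass 1: collect the indices where the running maximum of the row value
--     # strictly rises ("records"); index 0 opens the first row.
--     records = [0]
--     hi = arr[0][0]
--     for i, (row, _col) in enumerate(arr):
--         if row > hi:
--             records.append(i)
--             hi = row
--     # Pass 2: a line break falls on every record whose ordinal is a positive
--     # multiple of 3 (three rows per Braille line).
--     cuts = [idx for k, idx in enumerate(records) if k > 0 and k % 3 == 0]
--     bounds = [0] + cuts + [len(arr)]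
--     return [arr[a:b] for a, b in zip(bounds, bounds[1:])]
-- ===== Notes on version B (the rewrite author's own statement) =====
-- stated objective: alternative
-- what changed: A's single stateful scan juggling count/prev/start with in-loop resets is replaced by staged passes: first collect the indices where the running row maximum strictly rises (records), then cut at every record whose ordinal is a positive multiple of 3, and finally slice arr between consecutive boundaries.
import Mathlib
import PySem

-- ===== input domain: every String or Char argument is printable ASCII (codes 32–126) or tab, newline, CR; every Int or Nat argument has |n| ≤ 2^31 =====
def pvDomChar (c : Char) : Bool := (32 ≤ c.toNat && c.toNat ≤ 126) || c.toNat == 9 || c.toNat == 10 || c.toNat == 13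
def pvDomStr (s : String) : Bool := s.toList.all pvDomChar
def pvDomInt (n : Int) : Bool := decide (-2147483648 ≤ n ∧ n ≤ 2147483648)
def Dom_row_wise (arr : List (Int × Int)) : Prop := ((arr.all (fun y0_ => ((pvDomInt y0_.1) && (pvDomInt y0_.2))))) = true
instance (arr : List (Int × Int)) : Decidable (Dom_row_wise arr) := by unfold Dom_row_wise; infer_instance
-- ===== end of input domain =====

-- B replaces A's single stateful scan (count/prev/start with in-loop resets) by staged passes:
-- collect the running-max record indices, cut at every third record, slice between boundaries
-- (objective: alternative decomposition, same cost).

-- ===== PORT A =====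
-- loop body of A's 'for i in range(len(arr))'; state = (lines, count, prev, start)
def stepA (arr : List (Int × Int))
    (st : List (List (Int × Int)) × Int × Int × Nat) (i : Nat) :
    List (List (Int × Int)) × Int × Int × Nat :=
  let n := arr.length
  let (lines, count, prev, start) := st
  let (count, prev) :=
    if (PySem.List.pyGetD arr (i : Int) (0, 0)).1 > prev then  -- arr[i][0]; i < n, in range
      (count + 1, (PySem.List.pyGetD arr (i : Int) (0, 0)).1)
    else (count, prev)
  let (lines, count, prev, start) :=
    if count > 3 then
      (lines ++ [PySem.List.slice arr (some (start : Int)) (some (i : Int))], 1,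
        (PySem.List.pyGetD arr (i : Int) (0, 0)).1, i)
    else (lines, count, prev, start)
  let lines :=
    if i = n - 1 then
      lines ++ [PySem.List.slice arr (some (start : Int)) (some ((i : Int) + 1))]
    else lines
  (lines, count, prev, start)

def row_wise (arr : List (Int × Int)) : List (List (Int × Int)) :=
  -- prev = arr[0][0]: IndexError on the empty list; excluded by Pre_row_wise
  let prev0 := (PySem.List.pyGetD arr 0 (0, 0)).1
  ((List.range arr.length).foldl (stepA arr) ([], 1, prev0, 0)).1

-- ===== PORT B =====
-- body of B's 'for i, (row, _col) in enumerate(arr)'; state = (records, hi)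
def recsGo (st : List Int × Int) (p : Int × (Int × Int)) : List Int × Int :=
  if p.2.1 > st.2 then (st.1 ++ [p.1], p.2.1) else st

def row_wise_alt (arr : List (Int × Int)) : List (List (Int × Int)) :=
  -- hi = arr[0][0]: IndexError on the empty list; excluded by Pre_row_wise
  let hi0 := (PySem.List.pyGetD arr 0 (0, 0)).1
  let records := ((PySem.List.enumerate arr 0).foldl recsGo ([0], hi0)).1
  -- cuts = [idx for k, idx in enumerate(records) if k > 0 and k % 3 == 0]
  let cuts := ((PySem.List.enumerate records 0).filter
      (fun q => decide (q.1 > 0) && (PySem.Int.mod q.1 3 == 0))).map (fun q => q.2)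
  let bounds := ([(0 : Int)] ++ cuts) ++ [(arr.length : Int)]
  -- [arr[a:b] for a, b in zip(bounds, bounds[1:])]
  (bounds.zip (PySem.List.slice bounds (some 1) none)).map
    (fun p => PySem.List.slice arr (some p.1) (some p.2))

-- ===== PRECONDITION & SPEC =====
-- Pre_ excludes only the empty list, on which both A and B raise IndexError (arr[0][0])
def Pre_row_wise (arr : List (Int × Int)) : Prop := arr ≠ []
instance (arr : List (Int × Int)) : Decidable (Pre_row_wise arr) := by unfold Pre_row_wise; infer_instance
def pvWitness_row_wise : (List (Int × Int)) := [(1, 1), (2, 0)]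

def Spec_row_wise (arr : List (Int × Int)) (out : List (List (Int × Int))) : Prop := out = row_wise_alt arr
instance (arr : List (Int × Int)) (out : List (List (Int × Int))) : Decidable (Spec_row_wise arr out) := by unfold Spec_row_wise; infer_instance

-- ===== CLAIM (what is proved, stated in full; the proofs are below) =====
def Claim_equal_row_wise : Prop := ∀ (arr : List (Int × Int)), Dom_row_wise arr → Pre_row_wise arr → Spec_row_wise arr (row_wise arr)

-- ===== LEMMAS AND PROOFS =====

-- B's second pass applied to an arbitrary record list
def cutsOf (R : List Int) : List Int :=
  ((PySem.List.enumerate R 0).filter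
      (fun q => decide (q.1 > 0) && (PySem.Int.mod q.1 3 == 0))).map (fun q => q.2)

def bndsOf (R : List Int) : List Int := (0 : Int) :: cutsOf R

def linesOf (arr : List (Int × Int)) (R : List Int) : List (List (Int × Int)) :=
  ((bndsOf R).zip (bndsOf R).tail).map (fun p => PySem.List.slice arr (some p.1) (some p.2))

-- B's first pass restricted to the first i elements
def recsB (arr : List (Int × Int)) (i : Nat) : List Int × Int :=
  (PySem.List.enumerate (arr.take i) 0).foldl recsGo ([0], (PySem.List.pyGetD arr 0 (0, 0)).1)

-- A's loop body without the final-iteration append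
def stepCore (arr : List (Int × Int))
    (st : List (List (Int × Int)) × Int × Int × Nat) (i : Nat) :
    List (List (Int × Int)) × Int × Int × Nat :=
  let (lines, count, prev, start) := st
  let (count, prev) :=
    if (PySem.List.pyGetD arr (i : Int) (0, 0)).1 > prev then
      (count + 1, (PySem.List.pyGetD arr (i : Int) (0, 0)).1)
    else (count, prev)
  if count > 3 then
    (lines ++ [PySem.List.slice arr (some (start : Int)) (some (i : Int))], 1,
      (PySem.List.pyGetD arr (i : Int) (0, 0)).1, i)
  else (lines, count, prev, start)

theorem stepA_eq (arr : List (Int × Int)) (st : List (List (Int × Int)) × Int × Int × Nat) (i : Nat) :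
    stepA arr st i =
      (if i = arr.length - 1 then
        (stepCore arr st i).1 ++
          [PySem.List.slice arr (some ((stepCore arr st i).2.2.2 : Int)) (some ((i : Int) + 1))]
      else (stepCore arr st i).1,
      (stepCore arr st i).2) := by
  obtain ⟨L, c, p, s⟩ := st
  simp only [stepA, stepCore]

-- the record list is never empty
theorem recsGo_foldl_ne_nil (l : List (Int × (Int × Int))) :
    ∀ st : List Int × Int, st.1 ≠ [] → (l.foldl recsGo st).1 ≠ [] := by
  induction l with
  | nil => intro st h; exact h
  | cons p t ih =>
    intro st h
    apply ih
    unfold recsGo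
    split_ifs with hc
    · simp
    · exact h

theorem recsB_ne_nil (arr : List (Int × Int)) (i : Nat) : (recsB arr i).1 ≠ [] :=
  recsGo_foldl_ne_nil _ _ (by simp)

theorem recsB_succ (arr : List (Int × Int)) (i : Nat) (h : i < arr.length) :
    recsB arr (i + 1) = recsGo (recsB arr i) ((i : Int), arr[i]) := by
  unfold recsB
  rw [List.take_add_one, List.getElem?_eq_getElem h]
  rw [PySem.List.enumerate_append, List.foldl_append]
  simp only [Option.toList_some, PySem.List.enumerate_cons, PySem.List.enumerate_nil,
    List.foldl_cons, List.foldl_nil, List.length_take, Nat.min_eq_left h.le, zero_add]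

theorem cutsOf_append (R : List Int) (x : Int) (hR : R ≠ []) :
    cutsOf (R ++ [x]) = cutsOf R ++ (if R.length % 3 = 0 then [x] else []) := by
  unfold cutsOf
  rw [PySem.List.enumerate_append, List.filter_append, List.map_append]
  congr 1
  have hlen : 0 < R.length := List.length_pos_iff.mpr hR
  have henum : PySem.List.enumerate [x] ((0 : Int) + (R.length : Int)) =
      [(((0 : Int) + (R.length : Int)), x)] := by
    rw [PySem.List.enumerate_cons, PySem.List.enumerate_nil]
  rw [henum, List.filter_singleton]
  have hmod : PySem.Int.mod ((0 : Int) + (R.length : Int)) 3 = ((R.length % 3 : Nat) : Int) := by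
    rw [PySem.Int.mod_eq_emod_of_pos (by omega)]
    omega
  by_cases h3 : R.length % 3 = 0
  · have hcond : (decide (((0 : Int) + (R.length : Int)) > 0) &&
        (PySem.Int.mod ((0 : Int) + (R.length : Int)) 3 == 0)) = true := by
      rw [hmod]
      simp only [h3, Nat.cast_zero, beq_self_eq_true, Bool.and_true, decide_eq_true_eq]
      omega
    rw [hcond]
    simp [h3]
  · have hcond : (decide (((0 : Int) + (R.length : Int)) > 0) &&
        (PySem.Int.mod ((0 : Int) + (R.length : Int)) 3 == 0)) = false := by
      rw [hmod]
      simp only [Bool.and_eq_false_iff]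
      refine Or.inr ?_
      rw [beq_eq_false_iff_ne]
      exact_mod_cast h3
    rw [hcond]
    simp [h3]

theorem zipTail_append (b : List Int) (x : Int) (hb : b ≠ []) :
    (b ++ [x]).zip (b ++ [x]).tail = b.zip b.tail ++ [(b.getLastD 0, x)] := by
  induction b with
  | nil => exact absurd rfl hb
  | cons y t ih =>
    cases t with
    | nil => simp [List.zip]
    | cons z t' =>
      have := ih (by simp)
      simp only [List.cons_append, List.tail_cons, List.zip_cons_cons] at this ⊢
      rw [this]
      simp

-- the invariant tying A's loop state after i iterations to B's first pass on arr[:i]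
def Matches (arr : List (Int × Int)) (i : Nat)
    (st : List (List (Int × Int)) × Int × Int × Nat) : Prop :=
  st.1 = linesOf arr (recsB arr i).1 ∧
  st.2.1 = ((((recsB arr i).1.length - 1) % 3 : Nat) : Int) + 1 ∧
  st.2.2.1 = (recsB arr i).2 ∧
  ((st.2.2.2 : Nat) : Int) = (bndsOf (recsB arr i).1).getLastD 0

theorem match_step (arr : List (Int × Int)) (i : Nat) (h : i < arr.length)
    (st : List (List (Int × Int)) × Int × Int × Nat) (hm : Matches arr i st) :
    Matches arr (i + 1) (stepCore arr st i) := by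
  obtain ⟨L, c, p, s⟩ := st
  obtain ⟨h1, h2, h3, h4⟩ := hm
  simp only at h1 h2 h3 h4
  have hget : PySem.List.pyGetD arr (i : Int) (0, 0) = arr[i] := by
    rw [PySem.List.pyGetD_natCast, List.getD_eq_getElem?_getD, List.getElem?_eq_getElem h]
    rfl
  have hne := recsB_ne_nil arr i
  have hlen : 0 < (recsB arr i).1.length := List.length_pos_iff.mpr hne
  unfold Matches
  rw [recsB_succ arr i h]
  unfold stepCore recsGo
  dsimp only
  rw [hget, h3]
  by_cases hrec : arr[i].1 > (recsB arr i).2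
  · rw [if_pos hrec, if_pos hrec]
    dsimp only
    by_cases hcut : ((recsB arr i).1.length - 1) % 3 = 2
    · have hc4 : c + 1 > 3 := by rw [h2]; omega
      rw [if_pos hc4]
      have h3len : ((recsB arr i).1.length) % 3 = 0 := by omega
      have hbnds : bndsOf ((recsB arr i).1 ++ [(i : Int)]) =
          bndsOf (recsB arr i).1 ++ [(i : Int)] := by
        unfold bndsOf
        rw [cutsOf_append _ _ hne, if_pos h3len]
        simp
      refine ⟨?_, ?_, rfl, ?_⟩
      · rw [h1, h4]
        unfold linesOf
        rw [hbnds, zipTail_append _ _ (by unfold bndsOf; simp), List.map_append]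
        rfl
      · simp only [List.length_append, List.length_cons, List.length_nil]
        omega
      · simp only [hbnds]
        rw [List.getLastD_concat]
    · have hc3 : ¬ (c + 1 > 3) := by rw [h2]; omega
      rw [if_neg hc3]
      have h3len : ¬ ((recsB arr i).1.length) % 3 = 0 := by omega
      have hbnds : bndsOf ((recsB arr i).1 ++ [(i : Int)]) = bndsOf (recsB arr i).1 := by
        unfold bndsOf
        rw [cutsOf_append _ _ hne, if_neg h3len]
        simp
      refine ⟨?_, ?_, rfl, ?_⟩
      · rw [h1]
        unfold linesOf
        rw [hbnds]
      · rw [h2]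
        simp only [List.length_append, List.length_cons, List.length_nil]
        push_cast
        omega
      · rw [hbnds, h4]
  · rw [if_neg hrec, if_neg hrec]
    dsimp only
    have hc3 : ¬ (c > 3) := by rw [h2]; omega
    rw [if_neg hc3]
    exact ⟨h1, h2, h3 ▸ rfl, h4⟩

theorem foldA_matches (arr : List (Int × Int)) (hn : arr ≠ []) :
    ∀ j, j ≤ arr.length - 1 →
      Matches arr j ((List.range' 0 j).foldl (stepA arr)
        ([], 1, (PySem.List.pyGetD arr 0 (0, 0)).1, 0)) := by
  intro j
  induction j with
  | zero =>
    intro _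
    refine ⟨?_, by norm_num, rfl, by norm_num [bndsOf]; rfl⟩
    show ([] : List (List (Int × Int))) = linesOf arr (recsB arr 0).1
    rfl
  | succ j ih =>
    intro hj
    have hjlt : j < arr.length - 1 := by omega
    have hlen : 0 < arr.length := List.length_pos_iff.mpr hn
    rw [List.range'_1_concat, List.foldl_append, List.foldl_cons, List.foldl_nil]
    rw [stepA_eq]
    rw [if_neg (by omega : ¬ (0 + j = arr.length - 1))]
    have := match_step arr j (by omega) _ (ih (by omega))
    simpa using this

theorem row_wise_alt_eq (arr : List (Int × Int)) :
    row_wise_alt arr =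
      linesOf arr (recsB arr arr.length).1 ++
        [PySem.List.slice arr (some ((bndsOf (recsB arr arr.length).1).getLastD 0))
          (some (arr.length : Int))] := by
  unfold row_wise_alt linesOf bndsOf cutsOf recsB
  dsimp only
  rw [List.take_length, PySem.List.slice_from_one]
  rw [List.singleton_append]
  rw [zipTail_append _ _ (List.cons_ne_nil _ _), List.map_append]
  rfl

-- ===== VERDICT =====
theorem row_wise_spec : Claim_equal_row_wise := by
  intro arr _dom hpre
  unfold Spec_row_wise row_wise
  dsimp only
  have hlen : 0 < arr.length := List.length_pos_iff.mpr hpre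
  have hN : arr.length = (arr.length - 1) + 1 := by omega
  rw [List.range_eq_range', hN, List.range'_1_concat, List.foldl_append,
    List.foldl_cons, List.foldl_nil]
  rw [stepA_eq, if_pos (by omega : 0 + (arr.length - 1) = arr.length - 1)]
  have hm := match_step arr (arr.length - 1) (by omega) _
    (foldA_matches arr hpre (arr.length - 1) le_rfl)
  have hN' : (arr.length - 1) + 1 = arr.length := by omega
  rw [hN'] at hm
  obtain ⟨h1, _, _, h4⟩ := hm
  simp only [Nat.zero_add] at h1 h4 ⊢
  rw [h1, h4]
  have hcast : (((arr.length - 1 : Nat)) : Int) + 1 = (arr.length : Int) := by omega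
  rw [hcast, row_wise_alt_eq]
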